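-- pv_equiv track=rewrite | github.com/maciejjaskowski/farmer | src/farmer.py | zlicz
-- ===== SOURCE A (Python) =====
-- def zlicz(lista):
--     b = 0
--     for i in lista:
--         if i == 'owca':
--             b = b + 1
--     a = 0
--     for i in lista:
--         if i == 'krolik':
--             a = a + 1
--
--     return {
--         'maly_pies': 0,
--         'duzy_pies': 0,
--         'kon': 0,
--         'krowa': 0,
--         'swinka': 0,
--         'owca': b,
--         'krolik': a
--     }
-- ===== SOURCE B (Python) =====
-- def zlicz(lista):
--     s = sorted(lista)
--     owca = 0
--     krolik = 0
--     i = 0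
--     n = len(s)
--     while i < n:
--         j = i + 1
--         while j < n and s[j] == s[i]:
--             j += 1
--         if s[i] == 'owca':
--             owca = j - i
--         elif s[i] == 'krolik':
--             krolik = j - i
--         i = j
--     return {
--         'maly_pies': 0,
--         'duzy_pies': 0,
--         'kon': 0,
--         'krowa': 0,
--         'swinka': 0,
--         'owca': owca,
--         'krolik': krolik
--     }
-- ===== Notes on version B (the rewrite author's own statement) =====
-- stated objective: alternative
-- what changed: B sorts the list and scans it once as runs of equal elements, taking each run's length as that animal's count, instead of A's two separate targeted counting passes.
import Mathlib
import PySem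

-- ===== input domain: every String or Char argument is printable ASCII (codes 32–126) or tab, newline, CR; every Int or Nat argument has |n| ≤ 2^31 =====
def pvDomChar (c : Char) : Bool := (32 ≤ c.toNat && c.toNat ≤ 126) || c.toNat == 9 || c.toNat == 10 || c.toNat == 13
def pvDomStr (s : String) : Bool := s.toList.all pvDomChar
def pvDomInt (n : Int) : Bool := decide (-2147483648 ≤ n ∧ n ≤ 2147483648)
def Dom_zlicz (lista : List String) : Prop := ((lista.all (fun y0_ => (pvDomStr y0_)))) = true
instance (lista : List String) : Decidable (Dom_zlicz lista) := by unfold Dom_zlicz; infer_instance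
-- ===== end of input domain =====

-- B sorts the list and scans it once as runs of equal elements, reading each run's length
-- off as that animal's count, instead of A's two targeted counting passes (alternative algorithm).

-- ===== PORT A =====
def zlicz (lista : List String) : List (String × Int) :=
  let b := lista.foldl (fun b i => if i == "owca" then b + 1 else b) (0 : Int)
  let a := lista.foldl (fun a i => if i == "krolik" then a + 1 else a) (0 : Int)
  [("maly_pies", 0), ("duzy_pies", 0), ("kon", 0), ("krowa", 0), ("swinka", 0),
   ("owca", b), ("krolik", a)]

-- ===== PORT B =====
-- the outer while-loop of Source B: each step consumes one run of elements equal to the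
-- run head (the inner `while j` loop = takeWhile/dropWhile on (· == head)); j - i = run length
def zliczRunScan : List String → Int → Int → Int × Int
  | [], owca, krolik => (owca, krolik)
  | x :: xs, owca, krolik =>
    let run := xs.takeWhile (fun y => y == x)
    let rest := xs.dropWhile (fun y => y == x)
    let c : Int := (run.length : Int) + 1
    zliczRunScan rest (if x == "owca" then c else owca)
                      (if x == "krolik" then c else krolik)
termination_by s => s.length
decreasing_by
  simpa using Nat.lt_succ_of_le (List.length_dropWhile_le (fun y => y == x) xs)

def zlicz_alt (lista : List String) : List (String × Int) :=
  let s := PySem.List.sorted lista (fun x => x) false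
  let ok := zliczRunScan s 0 0
  [("maly_pies", 0), ("duzy_pies", 0), ("kon", 0), ("krowa", 0), ("swinka", 0),
   ("owca", ok.1), ("krolik", ok.2)]

-- ===== PRECONDITION & SPEC =====
def Spec_zlicz (lista : List String) (out : List (String × Int)) : Prop := out = zlicz_alt lista
instance (lista : List String) (out : List (String × Int)) : Decidable (Spec_zlicz lista out) := by unfold Spec_zlicz; infer_instance

-- ===== CLAIM (what is proved, stated in full; the proofs are below) =====
def Claim_equal_zlicz : Prop := ∀ (lista : List String), Dom_zlicz lista → Spec_zlicz lista (zlicz lista)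

-- ===== LEMMAS AND PROOFS =====

-- one component of the run-scan step: folding one run into the accumulator
theorem zlicz_comp_eq (w x : String) (acc : Int) (rest : List String) (xs : List String) (rl : ℕ)
    (hcnt : (x :: xs).count w = if x = w then rl + 1 else rest.count w)
    (hmem : w ∈ x :: xs ↔ w = x ∨ w ∈ rest)
    (hnot : x ∉ rest) :
    (if w ∈ rest then (rest.count w : Int) else if x == w then (rl : Int) + 1 else acc)
      = if w ∈ x :: xs then (((x :: xs).count w : ℕ) : Int) else acc := by
  by_cases hx : x = w
  · subst hx
    simp [hnot, hcnt, hmem]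
  · by_cases hm : w ∈ rest
    · simp [hm, hcnt, hx, hmem]
    · have hnm : ¬(w = x ∨ w ∈ rest) := by
        rintro (h | h)
        · exact hx h.symm
        · exact hm h
      simp [hm, hcnt, hx, hmem]
      exact fun h => absurd h.symm hx

-- On a ≤-sorted list, the run scan delivers the count of each key
-- (the accumulator survives exactly when the key is absent).
theorem zliczRunScan_eq : ∀ (n : ℕ) (s : List String), s.length ≤ n →
    s.Pairwise (· ≤ ·) → ∀ owca krolik : Int,
      zliczRunScan s owca krolik =
        ((if "owca" ∈ s then (s.count "owca" : Int) else owca),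
         (if "krolik" ∈ s then (s.count "krolik" : Int) else krolik)) := by
  intro n
  induction n with
  | zero =>
    intro s hs _ owca krolik
    have : s = [] := List.length_eq_zero_iff.mp (Nat.le_zero.mp hs)
    subst this; simp [zliczRunScan]
  | succ n ih =>
    intro s hs hpw owca krolik
    match s with
    | [] => simp [zliczRunScan]
    | x :: xs =>
      have hle : ∀ y ∈ xs, x ≤ y := (List.pairwise_cons.mp hpw).1
      have hpw_xs : xs.Pairwise (· ≤ ·) := (List.pairwise_cons.mp hpw).2
      set run := xs.takeWhile (fun y => y == x) with hrun_def
      set rest := xs.dropWhile (fun y => y == x) with hrest_def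
      have hsub : rest.Sublist xs := List.dropWhile_sublist _
      have hpw_rest : rest.Pairwise (· ≤ ·) := hpw_xs.sublist hsub
      have hsplit : run ++ rest = xs := List.takeWhile_append_dropWhile
      have hrun_mem : ∀ y ∈ run, y = x := by
        intro y hy
        have := List.mem_takeWhile_imp hy
        simpa using this
      -- x does not occur in rest
      have hnot : x ∉ rest := by
        cases hre : rest with
        | nil => simp
        | cons hd tl =>
          have hhd_ne : hd ≠ x := by
            have h := List.head?_dropWhile_not (p := fun y => y == x) (l := xs)
            rw [← hrest_def, hre] at h
            simpa using h
          have hx_lt : x < hd := lt_of_le_of_ne (hle hd (hsub.mem (by rw [hre]; simp)))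
            (Ne.symm hhd_ne)
          intro hmem
          rcases List.mem_cons.mp hmem with h1 | h1
          · exact hhd_ne h1.symm
          · have : hd ≤ x := by
              have := hpw_rest; rw [hre] at this
              exact (List.pairwise_cons.mp this).1 x h1
            exact absurd hx_lt (not_lt.mpr this)
      -- counts of an arbitrary key through the run decomposition
      have hcnt : ∀ w : String, (x :: xs).count w =
          (if x = w then run.length + 1 else rest.count w) := by
        intro w
        have hxs : xs.count w = run.count w + rest.count w := by
          rw [← hsplit, List.count_append]
        by_cases hw : x = w
        · subst hw
          have h1 : run.count x = run.length :=
            List.count_eq_length.mpr (fun b hb => by simp [hrun_mem b hb])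
          have h2 : rest.count x = 0 := List.count_eq_zero.mpr hnot
          simp [hxs, h1, h2]
        · have h1 : run.count w = 0 :=
            List.count_eq_zero.mpr (fun hmem => hw (hrun_mem w hmem).symm)
          simp [hxs, h1, hw]
      have hmem_iff : ∀ w : String, w ∈ x :: xs ↔ w = x ∨ w ∈ rest := by
        intro w
        constructor
        · intro hmem
          rcases List.mem_cons.mp hmem with h1 | h1
          · exact Or.inl h1
          · rw [← hsplit] at h1
            rcases List.mem_append.mp h1 with h2 | h2
            · exact Or.inl (hrun_mem w h2)
            · exact Or.inr h2
        · rintro (h1 | h1)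
          · simp [h1]
          · exact List.mem_cons.mpr (Or.inr (hsub.mem h1))
      have hrest_len : rest.length ≤ n := by
        have h1 : rest.length ≤ xs.length := List.length_dropWhile_le _ _
        have h2 : xs.length ≤ n := Nat.le_of_succ_le_succ (by simpa using hs)
        exact le_trans h1 h2
      rw [show zliczRunScan (x :: xs) owca krolik =
            zliczRunScan rest (if x == "owca" then (run.length : Int) + 1 else owca)
                              (if x == "krolik" then (run.length : Int) + 1 else krolik) from by
        rw [zliczRunScan]]
      rw [ih rest hrest_len hpw_rest]
      refine Prod.ext ?_ ?_
      · simpa using zlicz_comp_eq "owca" x owca rest xs run.length (hcnt "owca") (hmem_iff "owca") hnot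
      · simpa using zlicz_comp_eq "krolik" x krolik rest xs run.length (hcnt "krolik") (hmem_iff "krolik") hnot

-- ===== VERDICT (by name: the statement is the Claim_ definition above) =====
theorem zlicz_spec : Claim_equal_zlicz := by
  intro lista _
  unfold Spec_zlicz zlicz zlicz_alt
  dsimp only
  have hperm : (PySem.List.sorted lista (fun x => x) false).Perm lista :=
    PySem.List.sorted_perm lista (fun x => x) false
  have hpw : (PySem.List.sorted lista (fun x => x) false).Pairwise (· ≤ ·) := by
    simpa using PySem.List.sorted_pairwise (xs := lista) (key := fun x : String => x)
  rw [zliczRunScan_eq (PySem.List.sorted lista (fun x => x) false).length _ le_rfl hpw]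
  simp only [PySem.List.foldl_beq_add_one, zero_add]
  have hco : (PySem.List.sorted lista (fun x => x) false).count "owca" = lista.count "owca" :=
    hperm.count_eq _
  have hck : (PySem.List.sorted lista (fun x => x) false).count "krolik" = lista.count "krolik" :=
    hperm.count_eq _
  simp only [List.cons.injEq, Prod.mk.injEq, and_true, true_and]
  refine ⟨?_, ?_⟩
  · by_cases hm : "owca" ∈ PySem.List.sorted lista (fun x => x) false
    · simp [hm, hco]
    · have h0 : lista.count "owca" = 0 := by
        rw [← hco]; exact List.count_eq_zero.mpr hm
      simp [hm, h0]
  · by_cases hm : "krolik" ∈ PySem.List.sorted lista (fun x => x) false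
    · simp [hm, hck]
    · have h0 : lista.count "krolik" = 0 := by
        rw [← hck]; exact List.count_eq_zero.mpr hm
      simp [hm, h0]
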